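-- pv_equiv track=rewrite | github.com/faterazer/LeetCode | 2327. Number of People Aware of a Secret/Solution.py | peopleAwareOfSecret_MK2
-- ===== SOURCE A (Python) =====
-- def peopleAwareOfSecret_MK2(n: int, delay: int, forget: int) -> int:
--     MOD = 10**9 + 7
--     pre_sum = [0] * (n + 1)
--     pre_sum[1] = 1
--     for i in range(2, n + 1):
--         pre_sum[i] = pre_sum[i - 1]
--         if i > delay:
--             pre_sum[i] += pre_sum[i - delay]
--         if i > forget:
--             pre_sum[i] -= pre_sum[i - forget]
--         pre_sum[i] %= MOD
--     return (pre_sum[n] - pre_sum[n - forget]) % MOD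
-- ===== SOURCE B (Python) =====
-- def peopleAwareOfSecret_MK2(n: int, delay: int, forget: int) -> int:
--     MOD = 10**9 + 7
--     dp = [0] * (n + 1)
--     dp[1] = 1
--     share = 0
--     for i in range(2, n + 1):
--         if i - delay >= 1:
--             share += dp[i - delay]
--         if i - forget >= 1:
--             share -= dp[i - forget]
--         dp[i] = share % MOD
--     return sum(dp[max(0, n - forget + 1):]) % MOD
-- ===== Notes on version B (the rewrite author's own statement) =====
-- stated objective: alternative
-- what changed: B maintains raw per-day new-learner counts dp[i] via a sliding-window running sum and returns the sum of the last forget days, instead of A's telescoped prefix-sum array with a final pre_sum[n]-pre_sum[n-forget] subtraction (which negative-index-wraps when forget>n).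
-- intended difference: On n < forget <= 2n A's final subtraction indexes pre_sum[n-forget], which wraps around to the positive index 2n+1-forget and subtracts an unrelated prefix sum (e.g. A(3,1,4)=0), while B returns the intended total of everyone who ever learned the secret (B(3,1,4)=4), which is the right answer since nobody forgets within n days. — e.g. on peopleAwareOfSecret_MK2(3, 1, 4): A returns 0, B returns 4
-- outside the precondition, e.g. on peopleAwareOfSecret_MK2(3, 0, 2): A returns 2, B returns 1000000006; on peopleAwareOfSecret_MK2(2, 0, 2): A returns 2, B returns 1
import Mathlib
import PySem

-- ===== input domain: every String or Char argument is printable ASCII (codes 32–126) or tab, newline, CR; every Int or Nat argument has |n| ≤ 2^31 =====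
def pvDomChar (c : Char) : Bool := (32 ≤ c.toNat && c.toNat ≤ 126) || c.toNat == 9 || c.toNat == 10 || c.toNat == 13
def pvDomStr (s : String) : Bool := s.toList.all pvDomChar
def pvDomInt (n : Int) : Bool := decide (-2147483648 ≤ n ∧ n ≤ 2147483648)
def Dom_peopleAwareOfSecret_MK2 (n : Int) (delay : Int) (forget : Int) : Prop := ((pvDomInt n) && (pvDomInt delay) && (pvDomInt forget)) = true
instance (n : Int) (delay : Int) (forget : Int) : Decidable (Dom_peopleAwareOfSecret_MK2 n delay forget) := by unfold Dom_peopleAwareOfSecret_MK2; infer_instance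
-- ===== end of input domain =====

-- B replaces A's telescoped prefix-sum array (with its negative-index final subtraction) by raw
-- per-day counts maintained with a sliding-window running sum, summing the last `forget` days;
-- objective: alternative decomposition (same O(n) cost). Equal to A on Pre_ outside D_ (see D_).

-- ===== PORT A =====
def pvGet0 (l : List Int) (i : Int) : Int := PySem.List.pyGetD l i 0

def pvStepA (delay forget : Int) (pre : List Int) (i : Int) : List Int :=
  let pre1 := PySem.List.pySetD pre i (pvGet0 pre (i - 1))
  let pre2 := if delay < i then PySem.List.pySetD pre1 i (pvGet0 pre1 i + pvGet0 pre1 (i - delay)) else pre1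
  let pre3 := if forget < i then PySem.List.pySetD pre2 i (pvGet0 pre2 i - pvGet0 pre2 (i - forget)) else pre2
  PySem.List.pySetD pre3 i (PySem.Int.mod (pvGet0 pre3 i) 1000000007)

def peopleAwareOfSecret_MK2 (n : Int) (delay : Int) (forget : Int) : Int :=
  let pre0 := PySem.List.pySetD (List.replicate (n + 1).toNat (0 : Int)) 1 1
  let pre := (PySem.List.pyRange 2 (n + 1) 1).foldl (pvStepA delay forget) pre0
  PySem.Int.mod (pvGet0 pre n - pvGet0 pre (n - forget)) 1000000007

-- ===== PORT B =====
def pvStepB (delay forget : Int) (st : List Int × Int) (i : Int) : List Int × Int :=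
  let share1 := if 1 ≤ i - delay then st.2 + pvGet0 st.1 (i - delay) else st.2
  let share2 := if 1 ≤ i - forget then share1 - pvGet0 st.1 (i - forget) else share1
  (PySem.List.pySetD st.1 i (PySem.Int.mod share2 1000000007), share2)

def peopleAwareOfSecret_MK2_alt (n : Int) (delay : Int) (forget : Int) : Int :=
  let dp0 := PySem.List.pySetD (List.replicate (n + 1).toNat (0 : Int)) 1 1
  let st := (PySem.List.pyRange 2 (n + 1) 1).foldl (pvStepB delay forget) (dp0, 0)
  PySem.Int.mod (PySem.List.slice st.1 (some (max 0 (n - forget + 1))) none).sum 1000000007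

-- ===== PRECONDITION & SPEC =====
-- Pre_ keeps n ≥ 1, forget ≥ 0, forget ≤ 2n+1 (negative forget or forget > 2n+1 makes an index
-- raise IndexError), and delay ≥ 1 unless n = 1 (for n ≥ 2, delay < 0 raises IndexError and
-- delay = 0 is a degenerate self-sharing input outside the problem's domain on which A still
-- returns another value).
def Pre_peopleAwareOfSecret_MK2 (n : Int) (delay : Int) (forget : Int) : Prop :=
  1 ≤ n ∧ (1 ≤ delay ∨ n = 1) ∧ 0 ≤ forget ∧ forget ≤ 2 * n + 1

instance (n : Int) (delay : Int) (forget : Int) : Decidable (Pre_peopleAwareOfSecret_MK2 n delay forget) := by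
  unfold Pre_peopleAwareOfSecret_MK2; infer_instance

def pvWitness_peopleAwareOfSecret_MK2 : Int × Int × Int := (6, 2, 4)

-- On n < forget ≤ 2n nobody forgets within the horizon, but A's final subtraction indexes
-- pre_sum[n-forget], which wraps around to a positive index and subtracts an unrelated prefix sum;
-- B returns the intended total of all people who ever learned the secret.
def D_peopleAwareOfSecret_MK2 (n : Int) (delay : Int) (forget : Int) : Prop :=
  n < forget ∧ forget ≤ 2 * n

instance (n : Int) (delay : Int) (forget : Int) : Decidable (D_peopleAwareOfSecret_MK2 n delay forget) := by
  unfold D_peopleAwareOfSecret_MK2; infer_instance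

def Spec_peopleAwareOfSecret_MK2 (n : Int) (delay : Int) (forget : Int) (out : Int) : Prop :=
  ¬ D_peopleAwareOfSecret_MK2 n delay forget → out = peopleAwareOfSecret_MK2_alt n delay forget

instance (n : Int) (delay : Int) (forget : Int) (out : Int) : Decidable (Spec_peopleAwareOfSecret_MK2 n delay forget out) := by
  unfold Spec_peopleAwareOfSecret_MK2; infer_instance

def pvDiffWitness_peopleAwareOfSecret_MK2 : Int × Int × Int := (3, 1, 4)
def pvDiffWitnessOut_peopleAwareOfSecret_MK2 : Int × Int := (0, 4)

-- ===== CLAIM (what is proved, stated in full; the proofs are below) =====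
def Claim_unchanged_peopleAwareOfSecret_MK2 : Prop := ∀ (n : Int) (delay : Int) (forget : Int), Dom_peopleAwareOfSecret_MK2 n delay forget → Pre_peopleAwareOfSecret_MK2 n delay forget → Spec_peopleAwareOfSecret_MK2 n delay forget (peopleAwareOfSecret_MK2 n delay forget)
def Claim_changed_peopleAwareOfSecret_MK2 : Prop := Dom_peopleAwareOfSecret_MK2 (pvDiffWitness_peopleAwareOfSecret_MK2.1) (pvDiffWitness_peopleAwareOfSecret_MK2.2.1) (pvDiffWitness_peopleAwareOfSecret_MK2.2.2) ∧ Pre_peopleAwareOfSecret_MK2 (pvDiffWitness_peopleAwareOfSecret_MK2.1) (pvDiffWitness_peopleAwareOfSecret_MK2.2.1) (pvDiffWitness_peopleAwareOfSecret_MK2.2.2) ∧ D_peopleAwareOfSecret_MK2 (pvDiffWitness_peopleAwareOfSecret_MK2.1) (pvDiffWitness_peopleAwareOfSecret_MK2.2.1) (pvDiffWitness_peopleAwareOfSecret_MK2.2.2) ∧ peopleAwareOfSecret_MK2 (pvDiffWitness_peopleAwareOfSecret_MK2.1) (pvDiffWitness_peopleAwareOfSecret_MK2.2.1) (pvDiffWitness_peopleAwareOfSecret_MK2.2.2)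 = pvDiffWitnessOut_peopleAwareOfSecret_MK2.1 ∧ peopleAwareOfSecret_MK2_alt (pvDiffWitness_peopleAwareOfSecret_MK2.1) (pvDiffWitness_peopleAwareOfSecret_MK2.2.1) (pvDiffWitness_peopleAwareOfSecret_MK2.2.2) = pvDiffWitnessOut_peopleAwareOfSecret_MK2.2 ∧ pvDiffWitnessOut_peopleAwareOfSecret_MK2.1 ≠ pvDiffWitnessOut_peopleAwareOfSecret_MK2.2

-- ===== LEMMAS AND PROOFS =====

def pvQ (dn fn : Nat) : Nat → Int × Int
  | 0 => (0, 0)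
  | 1 => (1, 1)
  | (i + 2) =>
      let d := PySem.Int.mod ((pvQ dn fn (i + 2 - max dn 1)).2 - (pvQ dn fn (i + 2 - max fn 1)).2) 1000000007
      (d, (pvQ dn fn (i + 1)).2 + d)
  decreasing_by
  · have := Nat.le_max_right dn 1; omega
  · have := Nat.le_max_right fn 1; omega
  · omega


def pvDP (dn fn : Nat) (i : Nat) : Int := (pvQ dn fn i).1


def pvPS (dn fn : Nat) (i : Nat) : Int := (pvQ dn fn i).2

-- A's per-day prefix-sum value


def pvSA (dn fn : Nat) : Nat → Int
  | 0 => 0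
  | 1 => 1
  | (i + 2) => PySem.Int.mod ((pvSA dn fn (i + 1)) +
      (if dn < i + 2 then pvSA dn fn (i + 2 - max dn 1) else 0) -
      (if fn < i + 2 then pvSA dn fn (i + 2 - max fn 1) else 0)) 1000000007
  decreasing_by
  · omega
  · have := Nat.le_max_right dn 1; omega
  · have := Nat.le_max_right fn 1; omega


theorem pvPS_succ (dn fn k : Nat) : pvPS dn fn (k + 1) = pvPS dn fn k + pvDP dn fn (k + 1) := by
  match k with
  | 0 => simp [pvPS, pvDP, pvQ]
  | (j + 1) => rw [pvPS, pvPS, pvDP, pvQ]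


theorem pvDP_eq (dn fn i : Nat) : pvDP dn fn (i + 2) =
    PySem.Int.mod (pvPS dn fn (i + 2 - max dn 1) - pvPS dn fn (i + 2 - max fn 1)) 1000000007 := by
  rw [pvDP, pvQ]; rfl


theorem pvSA_modeq_pvPS (dn fn : Nat) : ∀ i, pvSA dn fn i ≡ pvPS dn fn i [ZMOD 1000000007] := by
  intro i
  have hM : (0:Int) < 1000000007 := by norm_num
  have hx : ∀ x : Int, x % 1000000007 ≡ x [ZMOD 1000000007] := fun x => Int.emod_emod_of_dvd x dvd_rfl
  induction i using Nat.strong_induction_on with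
  | _ i ih =>
    match i with
    | 0 => simp [pvSA, pvPS, pvQ]
    | 1 => simp [pvSA, pvPS, pvQ]
    | (j + 2) =>
      rw [pvSA, pvPS_succ, pvDP_eq, PySem.Int.mod_eq_emod_of_pos hM, PySem.Int.mod_eq_emod_of_pos hM]
      have h1 : pvSA dn fn (j + 1) ≡ pvPS dn fn (j + 1) [ZMOD 1000000007] := ih _ (by omega)
      have hd : (if dn < j + 2 then pvSA dn fn (j + 2 - max dn 1) else 0) ≡
          pvPS dn fn (j + 2 - max dn 1) [ZMOD 1000000007] := by
        split
        · exact ih _ (by have := Nat.le_max_right dn 1; omega)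
        · have h0 : j + 2 - max dn 1 = 0 := by omega
          rw [h0]; simp [pvPS, pvQ]
      have hf : (if fn < j + 2 then pvSA dn fn (j + 2 - max fn 1) else 0) ≡
          pvPS dn fn (j + 2 - max fn 1) [ZMOD 1000000007] := by
        split
        · exact ih _ (by have := Nat.le_max_right fn 1; omega)
        · have h0 : j + 2 - max fn 1 = 0 := by omega
          rw [h0]; simp [pvPS, pvQ]
      have hmid : pvSA dn fn (j + 1) +
          (if dn < j + 2 then pvSA dn fn (j + 2 - max dn 1) else 0) -
          (if fn < j + 2 then pvSA dn fn (j + 2 - max fn 1) else 0) ≡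
          pvPS dn fn (j + 1) + (pvPS dn fn (j + 2 - max dn 1) - pvPS dn fn (j + 2 - max fn 1))
          [ZMOD 1000000007] := by
        have := (h1.add hd).sub hf
        calc _ ≡ pvPS dn fn (j + 1) + pvPS dn fn (j + 2 - max dn 1) - pvPS dn fn (j + 2 - max fn 1) [ZMOD 1000000007] := this
          _ = _ := by ring
      exact (hx _).trans (hmid.trans ((hx _).symm.add_left _))


theorem pvPS_eq_sum (dn fn k : Nat) : pvPS dn fn k = ∑ j ∈ Finset.range (k + 1), pvDP dn fn j := by
  induction k with
  | zero => simp [pvPS, pvDP, pvQ]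
  | succ m ih => rw [pvPS_succ, Finset.sum_range_succ, ih]

-- range-map list view


def pvL (m : Nat) (f : Nat → Int) : List Int := (List.range m).map f


theorem pvL_length (m : Nat) (f : Nat → Int) : (pvL m f).length = m := by simp [pvL]


theorem pvL_get (m j : Nat) (f : Nat → Int) (h : j < m) : pvGet0 (pvL m f) (j : Int) = f j := by
  simp [pvGet0, pvL, PySem.List.pyGetD_natCast, List.getD, h]


theorem pvL_set (m j : Nat) (f : Nat → Int) (v : Int) :
    PySem.List.pySetD (pvL m f) (j : Int) v = pvL m (fun x => if x = j then v else f x) := by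
  rw [PySem.List.pySetD_natCast]
  apply List.ext_getElem
  · simp [pvL]
  · intro i h1 h2
    simp only [pvL, List.getElem_set, List.getElem_map, List.getElem_range]
    by_cases hij : i = j
    · simp [hij]
    · simp [hij, Ne.symm hij]


theorem pvL_congr (m : Nat) (f g : Nat → Int) (h : ∀ j, j < m → f j = g j) : pvL m f = pvL m g := by
  apply List.ext_getElem
  · simp [pvL]
  · intro i h1 h2
    simp only [pvL, List.getElem_map, List.getElem_range]
    exact h i (by simpa [pvL] using h1)


theorem pvL_get_neg (m j : Nat) (f : Nat → Int) (h0 : 0 < j) (h : j ≤ m) :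
    pvGet0 (pvL m f) (-(j : Int)) = f (m - j) := by
  rw [pvGet0, PySem.List.pyGetD_neg_natCast _ _ _ h0 (by simpa [pvL_length] using h)]
  simp [pvL, List.getElem_map, List.getElem_range]


theorem pvL_drop_sum (m a : Nat) (f : Nat → Int) :
    ((pvL m f).drop a).sum = ∑ j ∈ Finset.Ico a m, f j := by
  induction m with
  | zero => simp [pvL]
  | succ k ih =>
    by_cases h : a ≤ k
    · rw [pvL, List.range_succ, List.map_append,
        List.drop_append_of_le_length (by simp [h])]
      simp only [List.sum_append]
      rw [← pvL, ih, Finset.sum_Ico_succ_top h]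
      simp
    · rw [pvL, List.drop_eq_nil_of_le (by simp; omega), Finset.Ico_eq_empty (by omega)]
      simp


theorem pvStepA_eval (m dn fn i : Nat) (f : Nat → Int) (hi : 1 ≤ i) (him : i < m)
    (hd : 1 ≤ dn) (hf : 1 ≤ fn) :
    pvStepA (dn : Int) (fn : Int) (pvL m f) (i : Int) =
      pvL m (fun x => if x = i then
        PySem.Int.mod (f (i - 1) + (if dn < i then f (i - dn) else 0) -
          (if fn < i then f (i - fn) else 0)) 1000000007 else f x) := by
  unfold pvStepA
  simp only []
  have e1 : (i : Int) - 1 = ((i - 1 : Nat) : Int) := by omega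
  rw [e1, pvL_get m (i-1) f (by omega), pvL_set]
  by_cases hdi : dn < i <;> by_cases hfi : fn < i
  · rw [if_pos (show (dn:Int) < (i:Int) by exact_mod_cast hdi),
      if_pos (show (fn:Int) < (i:Int) by exact_mod_cast hfi)]
    have e2 : (i : Int) - (dn : Int) = ((i - dn : Nat) : Int) := by omega
    have e3 : (i : Int) - (fn : Int) = ((i - fn : Nat) : Int) := by omega
    rw [e2, e3]
    simp only [pvL_get m i _ him, pvL_get m (i - dn) _ (by omega : i - dn < m),
      pvL_set, pvL_get m (i - fn) _ (by omega : i - fn < m)]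
    apply pvL_congr; intro j hj
    by_cases hji : j = i
    · simp [hji, hdi, hfi, show ¬ (i - dn = i) from by omega, show ¬ (i - fn = i) from by omega]
    · simp [hji]
  · rw [if_pos (show (dn:Int) < (i:Int) by exact_mod_cast hdi),
      if_neg (show ¬ (fn:Int) < (i:Int) by exact_mod_cast hfi)]
    have e2 : (i : Int) - (dn : Int) = ((i - dn : Nat) : Int) := by omega
    rw [e2]
    simp only [pvL_get m i _ him, pvL_get m (i - dn) _ (by omega : i - dn < m), pvL_set]
    apply pvL_congr; intro j hj
    by_cases hji : j = i
    · simp [hji, hdi, hfi, show ¬ (i - dn = i) from by omega, show ¬ (i - fn = i) from by omega]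
    · simp [hji]
  · rw [if_neg (show ¬ (dn:Int) < (i:Int) by exact_mod_cast hdi),
      if_pos (show (fn:Int) < (i:Int) by exact_mod_cast hfi)]
    have e3 : (i : Int) - (fn : Int) = ((i - fn : Nat) : Int) := by omega
    rw [e3]
    simp only [pvL_get m i _ him, pvL_get m (i - fn) _ (by omega : i - fn < m), pvL_set]
    apply pvL_congr; intro j hj
    by_cases hji : j = i
    · simp [hji, hdi, hfi, show ¬ (i - dn = i) from by omega, show ¬ (i - fn = i) from by omega]
    · simp [hji]
  · rw [if_neg (show ¬ (dn:Int) < (i:Int) by exact_mod_cast hdi),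
      if_neg (show ¬ (fn:Int) < (i:Int) by exact_mod_cast hfi)]
    simp only [pvL_get m i _ him, pvL_set]
    apply pvL_congr; intro j hj
    by_cases hji : j = i
    · simp [hji, hdi, hfi, show ¬ (i - dn = i) from by omega, show ¬ (i - fn = i) from by omega]
    · simp [hji]


theorem pvStepB_eval (m dn fn i : Nat) (f : Nat → Int) (sh : Int) (hi : 1 ≤ i) (him : i < m)
    (hd : 1 ≤ dn) (hf : 1 ≤ fn) :
    pvStepB (dn : Int) (fn : Int) (pvL m f, sh) (i : Int) =
      (pvL m (fun x => if x = i then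
        PySem.Int.mod (sh + (if dn < i then f (i - dn) else 0) -
          (if fn < i then f (i - fn) else 0)) 1000000007 else f x),
       sh + (if dn < i then f (i - dn) else 0) - (if fn < i then f (i - fn) else 0)) := by
  unfold pvStepB
  simp only []
  by_cases hdi : dn < i <;> by_cases hfi : fn < i
  · rw [if_pos (show (1:Int) ≤ (i:Int) - (dn:Int) by omega),
      if_pos (show (1:Int) ≤ (i:Int) - (fn:Int) by omega)]
    have e2 : (i : Int) - (dn : Int) = ((i - dn : Nat) : Int) := by omega
    have e3 : (i : Int) - (fn : Int) = ((i - fn : Nat) : Int) := by omega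
    rw [e2, e3]
    simp only [pvL_get m (i - dn) _ (by omega : i - dn < m),
      pvL_get m (i - fn) _ (by omega : i - fn < m), pvL_set]
    simp [hdi, hfi]
  · rw [if_pos (show (1:Int) ≤ (i:Int) - (dn:Int) by omega),
      if_neg (show ¬ (1:Int) ≤ (i:Int) - (fn:Int) by omega)]
    have e2 : (i : Int) - (dn : Int) = ((i - dn : Nat) : Int) := by omega
    rw [e2]
    simp only [pvL_get m (i - dn) _ (by omega : i - dn < m), pvL_set]
    simp [hdi, hfi]
  · rw [if_neg (show ¬ (1:Int) ≤ (i:Int) - (dn:Int) by omega),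
      if_pos (show (1:Int) ≤ (i:Int) - (fn:Int) by omega)]
    have e3 : (i : Int) - (fn : Int) = ((i - fn : Nat) : Int) := by omega
    rw [e3]
    simp only [pvL_get m (i - fn) _ (by omega : i - fn < m), pvL_set]
    simp [hdi, hfi]
  · rw [if_neg (show ¬ (1:Int) ≤ (i:Int) - (dn:Int) by omega),
      if_neg (show ¬ (1:Int) ≤ (i:Int) - (fn:Int) by omega)]
    rw [pvL_set]
    simp [hdi, hfi]


def pvFA (dn fn k : Nat) : Nat → Int := fun j => if j ≤ k then pvSA dn fn j else 0


def pvFB (dn fn k : Nat) : Nat → Int := fun j => if j ≤ k then pvDP dn fn j else 0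


theorem pvFoldA (N dn fn : Nat) (hd : 1 ≤ dn) (hf : 1 ≤ fn) :
    ∀ k, 1 ≤ k → k ≤ N →
    (PySem.List.pyRange 2 ((k : Int) + 1) 1).foldl (pvStepA (dn : Int) (fn : Int))
        (pvL (N + 1) (pvFA dn fn 1)) = pvL (N + 1) (pvFA dn fn k) := by
  intro k
  induction k with
  | zero => omega
  | succ t ih =>
    intro h1 h2
    by_cases ht : 1 ≤ t
    · obtain ⟨u, rfl⟩ : ∃ u, t = u + 1 := ⟨t - 1, by omega⟩
      have ecast : ((u + 1 + 1 : Nat) : Int) + 1 = (((u + 1 : Nat) : Int) + 1) + 1 := by push_cast; ring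
      rw [ecast, PySem.List.pyRange_one_succ_right (by push_cast; omega), List.foldl_append,
        ih ht (by omega)]
      have ecast2 : ((u + 1 : Nat) : Int) + 1 = ((u + 2 : Nat) : Int) := by push_cast; ring
      simp only [List.foldl_cons, List.foldl_nil]
      rw [ecast2, pvStepA_eval (N + 1) dn fn (u + 2) _ (by omega) (by omega) hd hf]
      apply pvL_congr; intro j hj
      by_cases hji : j = u + 2
      · subst hji
        simp only [pvFA, if_pos (by omega : u + 2 ≤ u + 2)]
        have eD : (if dn < u + 2 then (if u + 2 - dn ≤ u + 1 then pvSA dn fn (u + 2 - dn) else 0) else 0)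
            = (if dn < u + 2 then pvSA dn fn (u + 2 - max dn 1) else 0) := by
          split
          · rw [if_pos (by omega), Nat.max_eq_left hd]
          · rfl
        have eF : (if fn < u + 2 then (if u + 2 - fn ≤ u + 1 then pvSA dn fn (u + 2 - fn) else 0) else 0)
            = (if fn < u + 2 then pvSA dn fn (u + 2 - max fn 1) else 0) := by
          split
          · rw [if_pos (by omega), Nat.max_eq_left hf]
          · rfl
        rw [show u + 2 - 1 = u + 1 from by omega, if_pos (by omega : u + 1 ≤ u + 1), eD, eF]
        rw [pvSA]
        simp
      · simp only [pvFA, if_neg hji]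
        split_ifs <;> first | rfl | omega
    · have ht0 : t = 0 := by omega
      subst ht0
      rw [PySem.List.pyRange_one_eq_nil (by norm_num)]
      rfl


theorem pvFoldB (N dn fn : Nat) (hd : 1 ≤ dn) (hf : 1 ≤ fn) :
    ∀ k, 1 ≤ k → k ≤ N →
    (PySem.List.pyRange 2 ((k : Int) + 1) 1).foldl (pvStepB (dn : Int) (fn : Int))
        (pvL (N + 1) (pvFB dn fn 1), 0) =
      (pvL (N + 1) (pvFB dn fn k), pvPS dn fn (k - dn) - pvPS dn fn (k - fn)) := by
  intro k
  induction k with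
  | zero => omega
  | succ t ih =>
    intro h1 h2
    by_cases ht : 1 ≤ t
    · obtain ⟨u, rfl⟩ : ∃ u, t = u + 1 := ⟨t - 1, by omega⟩
      have ecast : ((u + 1 + 1 : Nat) : Int) + 1 = (((u + 1 : Nat) : Int) + 1) + 1 := by push_cast; ring
      rw [ecast, PySem.List.pyRange_one_succ_right (by push_cast; omega), List.foldl_append,
        ih ht (by omega)]
      have ecast2 : ((u + 1 : Nat) : Int) + 1 = ((u + 2 : Nat) : Int) := by push_cast; ring
      simp only [List.foldl_cons, List.foldl_nil]
      rw [ecast2, pvStepB_eval (N + 1) dn fn (u + 2) _ _ (by omega) (by omega) hd hf]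
      have eD : (if dn < u + 2 then pvFB dn fn (u + 1) (u + 2 - dn) else 0)
          = (if dn < u + 2 then pvDP dn fn (u + 2 - dn) else 0) := by
        split
        · simp only [pvFB, if_pos (by omega : u + 2 - dn ≤ u + 1)]
        · rfl
      have eF : (if fn < u + 2 then pvFB dn fn (u + 1) (u + 2 - fn) else 0)
          = (if fn < u + 2 then pvDP dn fn (u + 2 - fn) else 0) := by
        split
        · simp only [pvFB, if_pos (by omega : u + 2 - fn ≤ u + 1)]
        · rfl
      have hsh : pvPS dn fn (u + 1 - dn) - pvPS dn fn (u + 1 - fn)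
            + (if dn < u + 2 then pvDP dn fn (u + 2 - dn) else 0)
            - (if fn < u + 2 then pvDP dn fn (u + 2 - fn) else 0)
          = pvPS dn fn (u + 2 - dn) - pvPS dn fn (u + 2 - fn) := by
        have hD : pvPS dn fn (u + 1 - dn) + (if dn < u + 2 then pvDP dn fn (u + 2 - dn) else 0)
            = pvPS dn fn (u + 2 - dn) := by
          split
          · rw [show u + 2 - dn = (u + 1 - dn) + 1 from by omega, pvPS_succ]
          · rw [show u + 2 - dn = u + 1 - dn from by omega]; ring
        have hF : pvPS dn fn (u + 1 - fn) + (if fn < u + 2 then pvDP dn fn (u + 2 - fn) else 0)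
            = pvPS dn fn (u + 2 - fn) := by
          split
          · rw [show u + 2 - fn = (u + 1 - fn) + 1 from by omega, pvPS_succ]
          · rw [show u + 2 - fn = u + 1 - fn from by omega]; ring
        rw [← hD, ← hF]; ring
      rw [eD, eF, hsh]
      have hdp : PySem.Int.mod (pvPS dn fn (u + 2 - dn) - pvPS dn fn (u + 2 - fn)) 1000000007
          = pvDP dn fn (u + 2) := by
        rw [pvDP_eq, Nat.max_eq_left hd, Nat.max_eq_left hf]
      rw [hdp]
      refine Prod.ext ?_ rfl
      show pvL (N + 1) _ = pvL (N + 1) (pvFB dn fn (u + 2))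
      apply pvL_congr; intro j hj
      by_cases hji : j = u + 2
      · subst hji
        simp [pvFB]
      · simp only [pvFB, if_neg hji]
        split_ifs <;> first | rfl | omega
    · have ht0 : t = 0 := by omega
      subst ht0
      rw [PySem.List.pyRange_one_eq_nil (by norm_num)]
      refine Prod.ext rfl ?_
      show (0 : Int) = pvPS dn fn (1 - dn) - pvPS dn fn (1 - fn)
      rw [show 1 - dn = 0 from by omega, show 1 - fn = 0 from by omega]
      simp [pvPS, pvQ]


theorem pvInit (N dn fn : Nat) :
    PySem.List.pySetD (List.replicate (N + 1) (0 : Int)) 1 1 = pvL (N + 1) (pvFA dn fn 1) := by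
  have h0 : List.replicate (N + 1) (0 : Int) = pvL (N + 1) (fun _ => 0) := by
    simp [pvL, List.map_const']
  have e1 : (1 : Int) = ((1 : Nat) : Int) := by norm_num
  rw [h0, e1, pvL_set]
  apply pvL_congr; intro j hj
  match j with
  | 0 => simp [pvFA, pvSA]
  | 1 => simp [pvFA, pvSA]
  | (t + 2) => simp [pvFA, show ¬(t + 2 = 1) from by omega, show ¬(t + 2 ≤ 1) from by omega]


theorem pvFA_FB_one (N dn fn : Nat) :
    pvL (N + 1) (pvFA dn fn 1) = pvL (N + 1) (pvFB dn fn 1) := by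
  apply pvL_congr; intro j hj
  match j with
  | 0 => simp [pvFA, pvFB, pvSA, pvDP, pvQ]
  | 1 => simp [pvFA, pvFB, pvSA, pvDP, pvQ]
  | (t + 2) => simp [pvFA, pvFB, show ¬(t + 2 ≤ 1) from by omega]


theorem pvLenB (delay forget : Int) (xs : List Int) :
    ∀ (l : List Int) (s : Int), ((xs.foldl (pvStepB delay forget) (l, s)).1).length = l.length := by
  induction xs with
  | nil => intro l s; rfl
  | cons i t ih =>
    intro l s
    simp only [List.foldl_cons]
    rw [pvStepB]
    simp only []
    rw [ih, PySem.List.length_pySetD]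

theorem pvZeroA (n delay : Int) : peopleAwareOfSecret_MK2 n delay 0 = 0 := by
  unfold peopleAwareOfSecret_MK2
  simp only []
  rw [sub_zero, sub_self, PySem.Int.mod_eq_emod_of_pos (by norm_num)]
  exact Int.zero_emod _

theorem pvZeroB (n delay : Int) (hn : 1 ≤ n) : peopleAwareOfSecret_MK2_alt n delay 0 = 0 := by
  unfold peopleAwareOfSecret_MK2_alt
  simp only []
  rw [sub_zero, max_eq_right (by omega : (0:Int) ≤ n + 1), PySem.List.slice_from _ (by omega : (0:Int) ≤ n + 1)]
  rw [List.drop_eq_nil_of_le (by rw [pvLenB, PySem.List.length_pySetD, List.length_replicate])]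
  rw [List.sum_nil, PySem.Int.mod_eq_emod_of_pos (by norm_num)]
  exact Int.zero_emod _

theorem pvN1 (delay forget : Int) (hf : forget = 1 ∨ forget = 3) :
    peopleAwareOfSecret_MK2 1 delay forget = peopleAwareOfSecret_MK2_alt 1 delay forget := by
  unfold peopleAwareOfSecret_MK2 peopleAwareOfSecret_MK2_alt
  rcases hf with h | h <;> subst h <;>
    simp only [show ((1:Int) + 1) = 2 from by norm_num,
      PySem.List.pyRange_one_eq_nil (le_refl (2:Int)), List.foldl_nil] <;> decide

theorem pvMain (n delay forget : Int) (hn : 1 ≤ n) (hd : 1 ≤ delay) (hf : 1 ≤ forget)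
    (hcase : forget ≤ n ∨ forget = 2 * n + 1) :
    peopleAwareOfSecret_MK2 n delay forget = peopleAwareOfSecret_MK2_alt n delay forget := by
  obtain ⟨N, rfl⟩ : ∃ N : Nat, n = (N : Int) := ⟨n.toNat, by omega⟩
  obtain ⟨dn, rfl⟩ : ∃ d : Nat, delay = (d : Int) := ⟨delay.toNat, by omega⟩
  obtain ⟨fn, rfl⟩ : ∃ f : Nat, forget = (f : Int) := ⟨forget.toNat, by omega⟩
  have hN : 1 ≤ N := by exact_mod_cast hn
  have hdn : 1 ≤ dn := by exact_mod_cast hd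
  have hfn : 1 ≤ fn := by exact_mod_cast hf
  unfold peopleAwareOfSecret_MK2 peopleAwareOfSecret_MK2_alt
  simp only []
  have hlen : ((N : Int) + 1).toNat = N + 1 := by omega
  rw [hlen, pvInit N dn fn]
  conv_rhs => rw [pvFA_FB_one, pvFoldB N dn fn hdn hfn N hN le_rfl]
  conv_lhs => rw [pvFoldA N dn fn hdn hfn N hN le_rfl]
  have hM : (0 : Int) < 1000000007 := by norm_num
  have hgN : pvGet0 (pvL (N + 1) (pvFA dn fn N)) (N : Int) = pvSA dn fn N := by
    rw [pvL_get (N + 1) N _ (by omega)]; simp [pvFA]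
  rcases hcase with hle | heq
  · have hfnN : fn ≤ N := by exact_mod_cast hle
    have eidx : (N : Int) - (fn : Int) = ((N - fn : Nat) : Int) := by omega
    have hg2 : pvGet0 (pvL (N + 1) (pvFA dn fn N)) ((N : Int) - (fn : Int)) = pvSA dn fn (N - fn) := by
      rw [eidx, pvL_get (N + 1) (N - fn) _ (by omega)]; simp [pvFA]
    have emax : max 0 ((N : Int) - (fn : Int) + 1) = ((N - fn + 1 : Nat) : Int) := by
      rw [max_eq_right (by omega)]; omega
    rw [hgN, hg2, emax, PySem.List.slice_from_natCast, pvL_drop_sum]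
    have hsum : ∑ j ∈ Finset.Ico (N - fn + 1) (N + 1), pvFB dn fn N j
        = pvPS dn fn N - pvPS dn fn (N - fn) := by
      rw [show ∑ j ∈ Finset.Ico (N - fn + 1) (N + 1), pvFB dn fn N j
          = ∑ j ∈ Finset.Ico (N - fn + 1) (N + 1), pvDP dn fn j from
        Finset.sum_congr rfl (fun j hj => by
          rw [Finset.mem_Ico] at hj
          simp [pvFB, show j ≤ N from by omega])]
      rw [Finset.sum_Ico_eq_sub _ (by omega), ← pvPS_eq_sum,
        show N - fn + 1 = (N - fn) + 1 from rfl, ← pvPS_eq_sum]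
    rw [hsum, PySem.Int.mod_eq_emod_of_pos hM, PySem.Int.mod_eq_emod_of_pos hM]
    exact (pvSA_modeq_pvPS dn fn N).sub (pvSA_modeq_pvPS dn fn (N - fn))
  · have hfnN : fn = 2 * N + 1 := by exact_mod_cast heq
    have eidx : (N : Int) - (fn : Int) = -(((N + 1 : Nat)) : Int) := by omega
    have hg2 : pvGet0 (pvL (N + 1) (pvFA dn fn N)) ((N : Int) - (fn : Int)) = 0 := by
      rw [eidx, pvL_get_neg (N + 1) (N + 1) _ (by omega) le_rfl]
      simp [pvFA, pvSA]
    have emax : max 0 ((N : Int) - (fn : Int) + 1) = 0 := by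
      rw [max_eq_left (by omega)]
    rw [hgN, hg2, emax, PySem.List.slice_zero_start, PySem.List.slice_none_none]
    have hsum : (pvL (N + 1) (pvFB dn fn N)).sum = pvPS dn fn N := by
      rw [show pvL (N + 1) (pvFB dn fn N) = (pvL (N + 1) (pvFB dn fn N)).drop 0 from rfl, pvL_drop_sum, ← Finset.range_eq_Ico]
      rw [show ∑ j ∈ Finset.range (N + 1), pvFB dn fn N j
          = ∑ j ∈ Finset.range (N + 1), pvDP dn fn j from
        Finset.sum_congr rfl (fun j hj => by
          rw [Finset.mem_range] at hj
          simp [pvFB, show j ≤ N from by omega])]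
      rw [← pvPS_eq_sum]
    rw [hsum, sub_zero, PySem.Int.mod_eq_emod_of_pos hM, PySem.Int.mod_eq_emod_of_pos hM]
    exact pvSA_modeq_pvPS dn fn N


-- ===== VERDICT (by name: the statement is the Claim_ definition above) =====
theorem peopleAwareOfSecret_MK2_spec : Claim_unchanged_peopleAwareOfSecret_MK2 := by
  intro n delay forget hDom hPre hnD
  obtain ⟨hn, hdor, hf0, h2n⟩ := hPre
  unfold D_peopleAwareOfSecret_MK2 at hnD
  rw [not_and_or, not_lt, not_le] at hnD
  by_cases hfz : forget = 0
  · subst hfz; rw [pvZeroA, pvZeroB n delay hn]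
  · have hf : 1 ≤ forget := by omega
    rcases hdor with hd | hn1
    · by_cases h : forget ≤ n
      · exact pvMain n delay forget hn hd hf (Or.inl h)
      · exact pvMain n delay forget hn hd hf (Or.inr (by rcases hnD with h1 | h1 <;> omega))
    · subst hn1
      refine pvN1 delay forget ?_
      by_cases h : forget ≤ 1
      · left; omega
      · right; rcases hnD with h1 | h1 <;> omega

theorem peopleAwareOfSecret_MK2_changed : Claim_changed_peopleAwareOfSecret_MK2 := by
  unfold Claim_changed_peopleAwareOfSecret_MK2; decide
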